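-- pv_equiv track=rewrite | github.com/r2277388/cb-rbh-desktop | invobs_consolidated_inventory/load_consolidated_inventory_legacy.py | choose_data_sheet
-- ===== SOURCE A (Python) =====
-- def choose_data_sheet(sheet_names):
--     preferred_prefix = "all_consolidated_inventories_v_"
--     preferred_matches = [
--         sheet_name
--         for sheet_name in sheet_names
--         if sheet_name.lower().startswith(preferred_prefix)
--     ]
--     if preferred_matches:
--         return preferred_matches[0]
--
--     for sheet_name in sheet_names:
--         if "consolidated" in sheet_name.lower():
--             return sheet_name
--
--     return sheet_names[0] if sheet_names else None
-- ===== SOURCE B (Python) =====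
-- def choose_data_sheet(sheet_names):
--     prefix = "all_consolidated_inventories_v_"
--     sub_match = None
--     for name in sheet_names:
--         low = name.lower()
--         if low.startswith(prefix):
--             return name
--         if sub_match is None and "consolidated" in low:
--             sub_match = name
--     if sub_match is not None:
--         return sub_match
--     return sheet_names[0] if sheet_names else None
-- ===== Notes on version B (the rewrite author's own statement) =====
-- stated objective: simpler
-- what changed: Replaces A's three passes (a filter building a list of prefix matches, then a second scan for a substring match, then an indexing fallback) by one single loop that returns immediately on the first prefix match and records the first substring match in a local variable.
import Mathlib
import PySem

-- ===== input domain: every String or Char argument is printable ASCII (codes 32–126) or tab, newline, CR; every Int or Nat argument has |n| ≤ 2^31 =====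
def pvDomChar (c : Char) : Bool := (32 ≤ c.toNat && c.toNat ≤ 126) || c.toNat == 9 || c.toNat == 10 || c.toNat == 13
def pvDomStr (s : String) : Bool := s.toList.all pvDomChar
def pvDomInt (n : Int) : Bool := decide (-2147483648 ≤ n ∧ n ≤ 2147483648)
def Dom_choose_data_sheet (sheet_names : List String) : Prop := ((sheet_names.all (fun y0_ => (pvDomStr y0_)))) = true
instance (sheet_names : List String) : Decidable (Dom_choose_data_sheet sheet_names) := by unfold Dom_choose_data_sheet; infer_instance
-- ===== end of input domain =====

-- B replaces A's three passes (filter list, second scan, index fallback) by one loop with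
-- an early return on prefix match and a local first-substring-match variable: simpler.


-- ===== PORT A =====
def choose_data_sheet (sheet_names : List String) : Option String :=
  let preferred_prefix := "all_consolidated_inventories_v_"
  let preferred_matches := sheet_names.filter
    (fun sheet_name => PySem.Str.startswith (PySem.Str.lower sheet_name) preferred_prefix)
  match preferred_matches with
  | m :: _ => some m
  | [] =>
    -- the 'for … return' loop = first element whose lowercase contains "consolidated"
    match sheet_names.find? (fun sheet_name => PySem.Str.isIn "consolidated" (PySem.Str.lower sheet_name)) with
    | some s => some s
    | none => sheet_names.head?   -- sheet_names[0] if sheet_names else None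

-- ===== PORT B =====
-- the single for-loop of Source B: sub is the recorded first substring match
def choose_alt_go (sub : Option String) : List String → Option String
  | [] => sub
  | name :: rest =>
    if PySem.Str.startswith (PySem.Str.lower name) "all_consolidated_inventories_v_" then some name
    else choose_alt_go (if sub.isNone && PySem.Str.isIn "consolidated" (PySem.Str.lower name) then some name else sub) rest

def choose_data_sheet_alt (sheet_names : List String) : Option String :=
  match choose_alt_go none sheet_names with
  | some s => some s          -- early return or recorded sub_match
  | none => sheet_names.head? -- sheet_names[0] if sheet_names else None

-- ===== PRECONDITION & SPEC =====
def Spec_choose_data_sheet (sheet_names : List String) (out : Option String) : Prop := out = choose_data_sheet_alt sheet_names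
instance (sheet_names : List String) (out : Option String) : Decidable (Spec_choose_data_sheet sheet_names out) := by unfold Spec_choose_data_sheet; infer_instance

-- ===== CLAIM (what is proved, stated in full; the proofs are below) =====
def Claim_equal_choose_data_sheet : Prop := ∀ (sheet_names : List String), Dom_choose_data_sheet sheet_names → Spec_choose_data_sheet sheet_names (choose_data_sheet sheet_names)

-- ===== LEMMAS AND PROOFS =====

-- abbreviations for the two tests, used only in the proofs
def pPref (s : String) : Bool := PySem.Str.startswith (PySem.Str.lower s) "all_consolidated_inventories_v_"
def pCont (s : String) : Bool := PySem.Str.isIn "consolidated" (PySem.Str.lower s)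

-- once sub_match is set, the loop returns it unless a prefix match occurs
theorem choose_alt_go_some (l : List String) (x : String) :
    choose_alt_go (some x) l = (match l.filter pPref with
      | m :: _ => some m
      | [] => some x) := by
  induction l with
  | nil => rfl
  | cons n rest ih =>
    by_cases h : pPref n = true
    · have h' : PySem.Str.startswith (PySem.Str.lower n) "all_consolidated_inventories_v_" = true := h
      rw [choose_alt_go, if_pos h', List.filter_cons, if_pos h]
    · have h' : ¬ PySem.Str.startswith (PySem.Str.lower n) "all_consolidated_inventories_v_" = true := h
      rw [choose_alt_go, if_neg h', List.filter_cons, if_neg h]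
      simpa using ih

-- characterisation of the loop started with sub_match = None
theorem choose_alt_go_none (l : List String) :
    choose_alt_go none l = (match l.filter pPref with
      | m :: _ => some m
      | [] => l.find? pCont) := by
  induction l with
  | nil => rfl
  | cons n rest ih =>
    by_cases h : pPref n = true
    · have h' : PySem.Str.startswith (PySem.Str.lower n) "all_consolidated_inventories_v_" = true := h
      rw [choose_alt_go, if_pos h', List.filter_cons, if_pos h]
    · have h' : ¬ PySem.Str.startswith (PySem.Str.lower n) "all_consolidated_inventories_v_" = true := h
      rw [choose_alt_go, if_neg h', List.filter_cons, if_neg h, List.find?_cons]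
      by_cases hc : pCont n = true
      · have hc' : PySem.Str.isIn "consolidated" (PySem.Str.lower n) = true := hc
        rw [show (Option.isNone (none : Option String) && PySem.Str.isIn "consolidated" (PySem.Str.lower n)) = true by rw [hc']; rfl,
            if_pos rfl, choose_alt_go_some rest n, hc]
      · have hc' : ¬ PySem.Str.isIn "consolidated" (PySem.Str.lower n) = true := hc
        rw [show (Option.isNone (none : Option String) && PySem.Str.isIn "consolidated" (PySem.Str.lower n)) = false by
              simp only [Option.isNone_none, Bool.true_and]; exact Bool.eq_false_iff.mpr hc',
            if_neg (by simp), ih]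
        have : pCont n = false := Bool.eq_false_iff.mpr hc
        rw [this]

-- ===== VERDICT (by name: the statement is the Claim_ definition above) =====
theorem choose_data_sheet_spec : Claim_equal_choose_data_sheet := by
  intro l _
  unfold Spec_choose_data_sheet choose_data_sheet choose_data_sheet_alt
  rw [choose_alt_go_none]
  show (match l.filter pPref with
        | m :: _ => some m
        | [] => match l.find? pCont with
                | some s => some s
                | none => l.head?) = _
  cases l.filter pPref with
  | cons m t => simp
  | nil => cases l.find? pCont <;> simp
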